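-- pv_equiv track=rewrite | github.com/avo1032/algorithm | programmers/programmers42888.py | solution
-- ===== SOURCE A (Python) =====
-- def solution(record):
--     answer = []
--     result = []
--     uidDoc = { }
--     for i in record:
--         splitRecord = i.split(" ")
--         if splitRecord[0] == "Enter" or splitRecord[0] == "Change":
--             uidDoc[splitRecord[1]] = splitRecord[2]
--
--         if splitRecord[0] == "Enter":
--             answer.append(["Enter", splitRecord[1]])
--
--         if splitRecord[0] == "Leave":
--             answer.append(["Leave", splitRecord[1]])
--
--     for j in answer:
--         if j[0] == "Enter":
--             result.append(uidDoc[j[1]] + "님이 들어왔습니다.")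
--         if j[0] == "Leave":
--             result.append(uidDoc[j[1]] + "님이 나갔습니다.")
--     return result
-- ===== SOURCE B (Python) =====
-- def solution(record):
--     out = []
--     slots = {}   # uid -> list of positions in out that await this uid's final name
--     names = {}
--     SUF = {"Enter": "님이 들어왔습니다.", "Leave": "님이 나갔습니다."}
--     for line in record:
--         p = line.split(" ")
--         if p[0] in ("Enter", "Change"):
--             names[p[1]] = p[2]
--         if p[0] in SUF:
--             slots.setdefault(p[1], []).append(len(out))
--             out.append(SUF[p[0]])
--     for uid, idxs in slots.items():
--         n = names[uid]
--         for i in idxs: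
--             out[i] = n + out[i]
--     return out
-- ===== Notes on version B (the rewrite author's own statement) =====
-- stated objective: alternative
-- what changed: B makes one pass that emits only the per-event suffix into the output and records each event's output position in an inverted uid->positions index, then patches the final name into those positions group by group; A instead builds an intermediate event list and re-derives every message in a second scan over it.
import Mathlib
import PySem

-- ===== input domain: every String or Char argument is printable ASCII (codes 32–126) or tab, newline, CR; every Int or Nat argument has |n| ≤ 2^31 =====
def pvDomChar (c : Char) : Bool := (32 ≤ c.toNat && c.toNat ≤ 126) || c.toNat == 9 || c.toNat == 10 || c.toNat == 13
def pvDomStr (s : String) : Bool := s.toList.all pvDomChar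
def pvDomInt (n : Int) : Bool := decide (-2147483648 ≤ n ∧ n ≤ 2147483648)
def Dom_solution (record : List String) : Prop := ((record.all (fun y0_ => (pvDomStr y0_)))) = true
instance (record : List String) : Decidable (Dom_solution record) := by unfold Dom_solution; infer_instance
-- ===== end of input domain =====

-- B replaces A's intermediate event list with an inverted uid->output-positions index: one pass
-- emits only each event's suffix and records its position, then the final names are patched in
-- group by group (alternative decomposition, same cost).

-- shared primitive wrapper: Python's s.split(" ") (sep nonempty, so split? always returns some)
def pvSplit (s : String) : List String := (PySem.Str.split? s " ").getD []

-- ===== PORT A =====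
def solution (record : List String) : List String :=
  let st := record.foldl (fun (st : List (List String) × PySem.Dict String String) i =>
    let sp := pvSplit i
    let a0 := PySem.List.pyGetD sp 0 ""
    let st1 := if a0 = "Enter" ∨ a0 = "Change" then
        (st.1, st.2.insert (PySem.List.pyGetD sp 1 "") (PySem.List.pyGetD sp 2 "")) else st
    let st2 := if a0 = "Enter" then (st1.1 ++ [["Enter", PySem.List.pyGetD sp 1 ""]], st1.2) else st1
    if a0 = "Leave" then (st2.1 ++ [["Leave", PySem.List.pyGetD sp 1 ""]], st2.2) else st2)
    ([], PySem.Dict.empty)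
  st.1.foldl (fun result j =>
    let j0 := PySem.List.pyGetD j 0 ""
    let r1 := if j0 = "Enter" then
        result ++ [st.2.getD (PySem.List.pyGetD j 1 "") "" ++ "님이 들어왔습니다."] else result
    if j0 = "Leave" then
        r1 ++ [st.2.getD (PySem.List.pyGetD j 1 "") "" ++ "님이 나갔습니다."] else r1) []

-- ===== PORT B =====
-- Python B's literal dict SUF
def pvSUF : PySem.Dict String String :=
  (PySem.Dict.empty.insert "Enter" "님이 들어왔습니다.").insert "Leave" "님이 나갔습니다."

def solution_alt (record : List String) : List String :=
  let st := record.foldl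
    (fun (st : List String × PySem.Dict String (List Nat) × PySem.Dict String String) line =>
      let p := pvSplit line
      let a := PySem.List.pyGetD p 0 ""
      let st1 := if a = "Enter" ∨ a = "Change" then
          (st.1, st.2.1, st.2.2.insert (PySem.List.pyGetD p 1 "") (PySem.List.pyGetD p 2 "")) else st
      if pvSUF.contains a then
        -- slots.setdefault(p[1], []).append(len(out)); out.append(SUF[p[0]])
        (st1.1 ++ [pvSUF.getD a ""],
         st1.2.1.modify (PySem.List.pyGetD p 1 "") [] (· ++ [st1.1.length]),
         st1.2.2)
      else st1)
    ([], PySem.Dict.empty, PySem.Dict.empty)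
  st.2.1.items.foldl (fun out q =>
    let n := st.2.2.getD q.1 ""
    q.2.foldl (fun out i => out.set i (n ++ out.getD i "")) out) st.1

-- ===== PRECONDITION & SPEC =====
-- Pre_ excludes exactly the inputs on which Python A raises: an "Enter"/"Change" line with
-- fewer than 3 fields (IndexError), a "Leave" line with fewer than 2 fields (IndexError),
-- or a "Leave" uid never registered by any "Enter"/"Change" line (KeyError).
def Pre_solution (record : List String) : Prop :=
  ∀ s ∈ record,
    ((pvSplit s).getD 0 "" = "Enter" ∨ (pvSplit s).getD 0 "" = "Change" →
      3 ≤ (pvSplit s).length) ∧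
    ((pvSplit s).getD 0 "" = "Leave" →
      2 ≤ (pvSplit s).length ∧
      ∃ t ∈ record, ((pvSplit t).getD 0 "" = "Enter" ∨ (pvSplit t).getD 0 "" = "Change") ∧
                    3 ≤ (pvSplit t).length ∧
                    (pvSplit t).getD 1 "" = (pvSplit s).getD 1 "")
instance (record : List String) : Decidable (Pre_solution record) := by unfold Pre_solution; infer_instance
def pvWitness_solution : List String :=
  ["Enter uid1234 Muzi", "Enter uid4567 Prodo", "Leave uid1234", "Enter uid1234 Prodo", "Change uid4567 Ryan"]
def Spec_solution (record : List String) (out : List String) : Prop := out = solution_alt record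
instance (record : List String) (out : List String) : Decidable (Spec_solution record out) := by unfold Spec_solution; infer_instance

-- ===== CLAIM (what is proved, stated in full; the proofs are below) =====
def Claim_equal_solution : Prop := ∀ (record : List String), Dom_solution record → Pre_solution record → Spec_solution record (solution record)

-- ===== LEMMAS AND PROOFS =====

-- the dict update both first passes perform per line
def pvDStep (d : PySem.Dict String String) (i : String) : PySem.Dict String String :=
  if PySem.List.pyGetD (pvSplit i) 0 "" = "Enter" ∨ PySem.List.pyGetD (pvSplit i) 0 "" = "Change" then
    d.insert (PySem.List.pyGetD (pvSplit i) 1 "") (PySem.List.pyGetD (pvSplit i) 2 "") else d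

-- the event A's first pass appends to `answer` for a line, if any
def pvEv (i : String) : Option (List String) :=
  if PySem.List.pyGetD (pvSplit i) 0 "" = "Enter" then some ["Enter", PySem.List.pyGetD (pvSplit i) 1 ""]
  else if PySem.List.pyGetD (pvSplit i) 0 "" = "Leave" then some ["Leave", PySem.List.pyGetD (pvSplit i) 1 ""]
  else none

-- the same event as an (action, uid) pair, for reasoning about B
def pvEv2 (i : String) : Option (String × String) :=
  if PySem.List.pyGetD (pvSplit i) 0 "" = "Enter" then some ("Enter", PySem.List.pyGetD (pvSplit i) 1 "")
  else if PySem.List.pyGetD (pvSplit i) 0 "" = "Leave" then some ("Leave", PySem.List.pyGetD (pvSplit i) 1 "")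
  else none

def pvSuf (a : String) : String := if a = "Enter" then "님이 들어왔습니다." else "님이 나갔습니다."

lemma pvFold1 (record : List String) : ∀ (acc : List (List String)) (d : PySem.Dict String String),
    record.foldl (fun (st : List (List String) × PySem.Dict String String) i =>
      let sp := pvSplit i
      let a0 := PySem.List.pyGetD sp 0 ""
      let st1 := if a0 = "Enter" ∨ a0 = "Change" then
          (st.1, st.2.insert (PySem.List.pyGetD sp 1 "") (PySem.List.pyGetD sp 2 "")) else st
      let st2 := if a0 = "Enter" then (st1.1 ++ [["Enter", PySem.List.pyGetD sp 1 ""]], st1.2) else st1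
      if a0 = "Leave" then (st2.1 ++ [["Leave", PySem.List.pyGetD sp 1 ""]], st2.2) else st2)
      (acc, d)
    = (acc ++ record.filterMap pvEv, record.foldl pvDStep d) := by
  induction record with
  | nil => simp
  | cons i rest ih =>
    intro acc d
    by_cases h1 : PySem.List.pyGetD (pvSplit i) 0 "" = "Enter"
    · simp [h1, pvEv, pvDStep, ih]
    · by_cases h2 : PySem.List.pyGetD (pvSplit i) 0 "" = "Change"
      · simp [h2, pvEv, pvDStep, ih]
      · by_cases h3 : PySem.List.pyGetD (pvSplit i) 0 "" = "Leave"
        · simp [h3, pvEv, pvDStep, ih]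
        · simp [h1, h2, h3, pvEv, pvDStep, ih]

lemma pvEvShape (i : String) (j : List String) (h : pvEv i = some j) :
    (∃ u, j = ["Enter", u]) ∨ (∃ u, j = ["Leave", u]) := by
  unfold pvEv at h
  split_ifs at h with h1 h2
  · exact Or.inl ⟨_, (Option.some.injEq _ _ ▸ h).symm⟩
  · exact Or.inr ⟨_, (Option.some.injEq _ _ ▸ h).symm⟩

lemma pvGet1 (a b : String) : PySem.List.pyGetD [a, b] 1 "" = b := rfl

lemma pvFold2 (d : PySem.Dict String String) (l : List (List String))
    (hl : ∀ j ∈ l, (∃ u, j = ["Enter", u]) ∨ (∃ u, j = ["Leave", u])) :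
    ∀ (acc : List String),
    l.foldl (fun result j =>
      let j0 := PySem.List.pyGetD j 0 ""
      let r1 := if j0 = "Enter" then
          result ++ [d.getD (PySem.List.pyGetD j 1 "") "" ++ "님이 들어왔습니다."] else result
      if j0 = "Leave" then
          r1 ++ [d.getD (PySem.List.pyGetD j 1 "") "" ++ "님이 나갔습니다."] else r1) acc
    = acc ++ l.map (fun j => if PySem.List.pyGetD j 0 "" = "Enter"
        then d.getD (PySem.List.pyGetD j 1 "") "" ++ "님이 들어왔습니다."
        else d.getD (PySem.List.pyGetD j 1 "") "" ++ "님이 나갔습니다.") := by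
  induction l with
  | nil => simp
  | cons j rest ih =>
    intro acc
    have hrest : ∀ x ∈ rest, (∃ u, x = ["Enter", u]) ∨ (∃ u, x = ["Leave", u]) :=
      fun x hx => hl x (by simp [hx])
    rcases hl j (by simp) with ⟨u, rfl⟩ | ⟨u, rfl⟩ <;>
      simp [ih hrest, pvGet1]

-- A's value, in (action, uid)-pair form
lemma pvABridge (record : List String) (d : PySem.Dict String String) :
    (record.filterMap pvEv).map (fun j => if PySem.List.pyGetD j 0 "" = "Enter"
        then d.getD (PySem.List.pyGetD j 1 "") "" ++ "님이 들어왔습니다."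
        else d.getD (PySem.List.pyGetD j 1 "") "" ++ "님이 나갔습니다.")
    = (record.filterMap pvEv2).map (fun e => d.getD e.2 "" ++ pvSuf e.1) := by
  rw [List.map_filterMap, List.map_filterMap]
  apply List.filterMap_congr
  intro i _
  unfold pvEv pvEv2 pvSuf
  by_cases h1 : PySem.List.pyGetD (pvSplit i) 0 "" = "Enter"
  · simp [h1, pvGet1]
  · by_cases h3 : PySem.List.pyGetD (pvSplit i) 0 "" = "Leave"
    · simp [h1, h3, pvGet1]
    · simp [h1, h3]

lemma pvSUF_contains (a : String) : pvSUF.contains a = (a == "Leave" || a == "Enter") := by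
  unfold pvSUF
  rw [PySem.Dict.contains_insert, PySem.Dict.contains_insert]
  simp [PySem.Dict.contains_empty]

lemma pvSUF_getD_enter : pvSUF.getD "Enter" "" = "님이 들어왔습니다." := by decide
lemma pvSUF_getD_leave : pvSUF.getD "Leave" "" = "님이 나갔습니다." := by decide
lemma pvSUF_c_enter : pvSUF.contains "Enter" = true := by decide
lemma pvSUF_c_leave : pvSUF.contains "Leave" = true := by decide
lemma pvSUF_c_change : pvSUF.contains "Change" = false := by decide

-- B's first pass: out collects suffixes, slots collects (uid, position) pairs, names as A
lemma pvBFold1 (record : List String) :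
    ∀ (out0 : List String) (slots0 : PySem.Dict String (List Nat)) (names0 : PySem.Dict String String),
    record.foldl
      (fun (st : List String × PySem.Dict String (List Nat) × PySem.Dict String String) line =>
        let p := pvSplit line
        let a := PySem.List.pyGetD p 0 ""
        let st1 := if a = "Enter" ∨ a = "Change" then
            (st.1, st.2.1, st.2.2.insert (PySem.List.pyGetD p 1 "") (PySem.List.pyGetD p 2 "")) else st
        if pvSUF.contains a then
          (st1.1 ++ [pvSUF.getD a ""],
           st1.2.1.modify (PySem.List.pyGetD p 1 "") [] (· ++ [st1.1.length]),
           st1.2.2)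
        else st1)
      (out0, slots0, names0)
    = (out0 ++ (record.filterMap pvEv2).map (fun e => pvSuf e.1),
       (((record.filterMap pvEv2).zipIdx out0.length).map (fun q => (q.1.2, q.2))).foldl
         (fun d q => d.modify q.1 [] (· ++ [q.2])) slots0,
       record.foldl pvDStep names0) := by
  induction record with
  | nil => simp
  | cons i rest ih =>
    intro out0 slots0 names0
    by_cases h1 : PySem.List.pyGetD (pvSplit i) 0 "" = "Enter"
    · simp [h1, pvSUF_c_enter, pvSUF_getD_enter, ih, pvEv2, pvDStep, pvSuf,
            List.zipIdx_cons]
    · by_cases h2 : PySem.List.pyGetD (pvSplit i) 0 "" = "Change"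
      · simp [h2, pvSUF_c_change, ih, pvEv2, pvDStep]
      · by_cases h3 : PySem.List.pyGetD (pvSplit i) 0 "" = "Leave"
        · simp [h3, pvSUF_c_leave, pvSUF_getD_leave, ih, pvEv2, pvDStep, pvSuf,
                List.zipIdx_cons]
        · have hc : pvSUF.contains (PySem.List.pyGetD (pvSplit i) 0 "") = false := by
            rw [pvSUF_contains]; simp [h1, h3]
          simp [h1, h2, h3, hc, ih, pvEv2, pvDStep]

-- positions recorded for uid u (in order): exactly the event indices whose uid is u
lemma pvMemIdx (evs : List (String × String)) (u : String) (j : Nat) :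
    (j ∈ (((evs.zipIdx 0).map (fun q => (q.1.2, q.2))).filter (fun p => p.1 == u)).map (·.2))
    ↔ ∃ h : j < evs.length, (evs[j]).2 = u := by
  simp only [List.mem_map, List.mem_filter, beq_iff_eq]
  constructor
  · rintro ⟨p, ⟨⟨q, hq, rfl⟩, hu⟩, rfl⟩
    have := List.mem_zipIdx_iff_getElem?.1 hq
    rcases List.getElem?_eq_some_iff.1 this with ⟨h, hg⟩
    exact ⟨h, by rw [hg]; exact hu⟩
  · rintro ⟨h, hu⟩
    refine ⟨((evs[j]).2, j), ⟨⟨(evs[j], j), ?_, rfl⟩, hu⟩, rfl⟩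
    exact List.mem_zipIdx_iff_getElem?.2 (List.getElem?_eq_getElem h)

lemma pvIdxNodup (evs : List (String × String)) (u : String) :
    ((((evs.zipIdx 0).map (fun q => (q.1.2, q.2))).filter (fun p => p.1 == u)).map (·.2)).Nodup := by
  have hsub : ((((evs.zipIdx 0).map (fun q => (q.1.2, q.2))).filter (fun p => p.1 == u)).map (·.2)).Sublist
      (((evs.zipIdx 0).map (fun q => (q.1.2, q.2))).map (·.2)) :=
    (List.filter_sublist).map _
  refine hsub.nodup ?_
  rw [List.map_map]
  have : ((fun (p : String × Nat) => p.2) ∘ fun (q : (String × String) × Nat) => (q.1.2, q.2))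
      = Prod.snd := rfl
  rw [this, List.zipIdx_map_snd]
  exact List.nodup_range' 1

-- inner patch loop: sets a nodup set of in-range positions, each to g of its old value
lemma pvSetFold (g : String → String) : ∀ (idxs : List Nat) (out : List String),
    idxs.Nodup → (∀ i ∈ idxs, i < out.length) →
    (idxs.foldl (fun out i => out.set i (g (out.getD i ""))) out).length = out.length ∧
    ∀ j, (idxs.foldl (fun out i => out.set i (g (out.getD i ""))) out).getD j ""
      = if j ∈ idxs then g (out.getD j "") else out.getD j "" := by
  intro idxs
  induction idxs with
  | nil => intro out _ _; simp
  | cons i rest ih =>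
    intro out hnd hlt
    have hi : i < out.length := hlt i (by simp)
    have hnotin : i ∉ rest := (List.nodup_cons.1 hnd).1
    obtain ⟨hlen, hval⟩ := ih (out.set i (g (out.getD i ""))) (List.nodup_cons.1 hnd).2
      (fun x hx => by rw [List.length_set]; exact hlt x (List.mem_cons_of_mem _ hx))
    rw [List.length_set] at hlen
    constructor
    · rw [List.foldl_cons]; exact hlen
    · intro j
      rw [List.foldl_cons, hval j]
      by_cases hji : j = i
      · subst hji
        rw [if_neg hnotin, if_pos (by simp)]
        rw [List.getD_eq_getElem?_getD, List.getElem?_set, if_pos rfl, if_pos hi,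
            Option.getD_some]
      · have hset : (out.set i (g (out.getD i ""))).getD j "" = out.getD j "" := by
          rw [List.getD_eq_getElem?_getD, List.getElem?_set, if_neg (fun h => hji h.symm),
              ← List.getD_eq_getElem?_getD]
        rw [hset]
        by_cases hjr : j ∈ rest
        · rw [if_pos hjr, if_pos (List.mem_cons_of_mem _ hjr)]
        · rw [if_neg hjr, if_neg (by simp [hji, hjr])]

-- outer patch loop over distinct uids
lemma pvPatch (evs : List (String × String)) (names : PySem.Dict String String) :
    ∀ (us : List String) (out : List String), us.Nodup → out.length = evs.length →
    ((us.map (fun u => (u, (((evs.zipIdx 0).map (fun q => (q.1.2, q.2))).filter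
        (fun p => p.1 == u)).map (·.2)))).foldl
      (fun out q => q.2.foldl (fun out i => out.set i (names.getD q.1 "" ++ out.getD i "")) out)
      out).length = out.length ∧
    ∀ j (hj : j < evs.length),
      ((us.map (fun u => (u, (((evs.zipIdx 0).map (fun q => (q.1.2, q.2))).filter
          (fun p => p.1 == u)).map (·.2)))).foldl
        (fun out q => q.2.foldl (fun out i => out.set i (names.getD q.1 "" ++ out.getD i "")) out)
        out).getD j ""
      = if (evs[j]).2 ∈ us then names.getD (evs[j]).2 "" ++ out.getD j "" else out.getD j "" := by
  intro us
  induction us with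
  | nil => intro out _ _; simp
  | cons u rest ih =>
    intro out hnd hlen
    have hbound : ∀ i ∈ (((evs.zipIdx 0).map (fun q => (q.1.2, q.2))).filter
        (fun p => p.1 == u)).map (·.2), i < out.length := by
      intro i hi
      rcases (pvMemIdx evs u i).1 hi with ⟨h, _⟩
      omega
    obtain ⟨hlen1, hval1⟩ := pvSetFold (fun s => names.getD u "" ++ s) _ out
      (pvIdxNodup evs u) hbound
    set out1 := (((evs.zipIdx 0).map (fun q => (q.1.2, q.2))).filter
        (fun p => p.1 == u)).map (·.2) |>.foldl
        (fun out i => out.set i (names.getD u "" ++ out.getD i "")) out with hout1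
    obtain ⟨hlen2, hval2⟩ := ih out1 (List.nodup_cons.1 hnd).2 (by rw [hlen1, hlen])
    refine ⟨by simpa [hlen1] using hlen2, fun j hj => ?_⟩
    simp only [List.map_cons, List.foldl_cons]
    rw [hval2 j hj]
    have h1 := hval1 j
    simp only [pvMemIdx] at h1
    by_cases hju : (evs[j]).2 = u
    · have hnotin : (evs[j]).2 ∉ rest := hju ▸ (List.nodup_cons.1 hnd).1
      rw [if_pos ⟨hj, hju⟩] at h1
      rw [if_neg hnotin, h1, hju, if_pos (by simp)]
    · rw [if_neg (by simp [hju])] at h1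
      rw [h1]
      by_cases hjr : (evs[j]).2 ∈ rest
      · rw [if_pos hjr, if_pos (List.mem_cons_of_mem _ hjr)]
      · rw [if_neg hjr, if_neg (by simp [hju, hjr])]

lemma pvSlotsChar (evs : List (String × String)) :
    ((((evs.zipIdx 0).map (fun q => (q.1.2, q.2))).foldl
        (fun d q => d.modify q.1 [] (· ++ [q.2])) (PySem.Dict.empty : PySem.Dict String (List Nat))).items)
    = (PySem.Set.ofList (evs.map (·.2))).map (fun u =>
        (u, (((evs.zipIdx 0).map (fun q => (q.1.2, q.2))).filter (fun p => p.1 == u)).map (·.2))) := by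
  set pairs := (evs.zipIdx 0).map (fun q => (q.1.2, q.2)) with hpairs
  set S := pairs.foldl (fun d q => d.modify q.1 [] (· ++ [q.2]))
      (PySem.Dict.empty : PySem.Dict String (List Nat)) with hS
  have hnd : S.keys.Nodup := by
    rw [hS]
    exact PySem.Dict.nodup_keys_foldl_modify_key pairs Prod.fst [] (fun _ q => (· ++ [q.2]))
      PySem.Dict.empty PySem.Dict.nodup_keys_empty
  have hkeys : S.keys = PySem.Set.ofList (evs.map (·.2)) := by
    rw [hS]
    rw [PySem.Dict.keys_foldl_modify_key pairs Prod.fst [] (fun _ q => (· ++ [q.2])) PySem.Dict.empty]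
    rw [show (PySem.Dict.empty : PySem.Dict String (List Nat)).keys = [] from rfl,
        PySem.Set.update_nil_left]
    congr 1
    rw [hpairs, List.map_map]
    have : (Prod.fst ∘ fun (q : (String × String) × Nat) => (q.1.2, q.2))
        = (fun q : (String × String) × Nat => q.1.2) := rfl
    rw [this, show (fun q : (String × String) × Nat => q.1.2)
        = (fun p : String × String => p.2) ∘ Prod.fst from rfl, ← List.map_map,
        List.zipIdx_map_fst]
  rw [PySem.Dict.items_eq_map_keys S hnd ([] : List Nat), hkeys]
  apply List.map_congr_left
  intro u _
  congr 1
  rw [hS, PySem.Dict.getD_foldl_modify_append]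
  simp

lemma pvMapGetD (evs : List (String × String)) (f : String × String → String) (j : Nat)
    (hj : j < evs.length) : (evs.map f).getD j "" = f evs[j] := by
  rw [List.getD_eq_getElem?_getD, List.getElem?_map, List.getElem?_eq_getElem hj]
  rfl

-- ===== VERDICT (by name: the statement is the Claim_ definition above) =====
theorem solution_spec : Claim_equal_solution := by
  intro record _ _
  unfold Spec_solution solution solution_alt
  rw [pvFold1 record [] PySem.Dict.empty]
  simp only [List.nil_append]
  set names := record.foldl pvDStep PySem.Dict.empty with hnames
  rw [pvFold2 names (record.filterMap pvEv)
        (fun j hj => by rcases List.mem_filterMap.1 hj with ⟨i, _, hev⟩; exact pvEvShape i j hev) []]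
  simp only [List.nil_append]
  rw [pvABridge record names]
  rw [pvBFold1 record [] PySem.Dict.empty PySem.Dict.empty]
  simp only [List.nil_append, List.length_nil]
  set evs := record.filterMap pvEv2 with hevs
  rw [pvSlotsChar evs]
  have hndu : (PySem.Set.ofList (evs.map (·.2))).Nodup := PySem.Set.nodup_ofList _
  obtain ⟨hlen, hval⟩ := pvPatch evs names (PySem.Set.ofList (evs.map (·.2)))
      (evs.map (fun e => pvSuf e.1)) hndu (by simp)
  apply Eq.symm
  apply List.ext_getElem (by simpa using hlen)
  intro j h1 h2
  have hj : j < evs.length := by simpa using h2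
  have hmain := hval j hj
  rw [if_pos (by rw [PySem.Set.mem_ofList]; exact List.mem_map_of_mem (List.getElem_mem hj))] at hmain
  rw [pvMapGetD evs (fun e => pvSuf e.1) j hj] at hmain
  rw [List.getD_eq_getElem?_getD, List.getElem?_eq_getElem h1, Option.getD_some] at hmain
  rw [hmain, List.getElem_map]
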